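-- pv_equiv track=rewrite | github.com/n-elhamawy/WP1.3.1 | scripts/python_scripts/translatePatterns.py | filterChanges
-- ===== SOURCE A (Python) =====
-- def filterChanges(patterns):
-- 	timings = list(patterns.keys())
-- 	timings.remove(0)
-- 	signals = list(patterns[0].keys())
-- 	arraySize = len(signals)
-- 	change = [0 for n in range(0,arraySize)]
-- 	for timing in timings:
-- 		for i in range(0,arraySize):
-- 			if patterns[timing][signals[i]] == patterns[change[i]][signals[i]]:
-- 				del patterns[timing][signals[i]]
-- 			else:
-- 				change[i] = timing
-- 	return patterns
-- ===== SOURCE B (Python) =====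
-- def filterChanges(patterns):
--     # One functional pass with a running last-value dict; unlike A, does not
--     # mutate the input (A deletes in place) -- the RETURN value is identical.
--     timings = [t for t in patterns if t != 0]
--     last = dict(patterns[0])
--     result = dict(patterns)
--     for timing in timings:
--         kept = {}
--         for k, v in patterns[timing].items():
--             if k in last and v == last[k]:
--                 continue
--             kept[k] = v
--             if k in last:
--                 last[k] = v
--         result[timing] = kept
--     return result
-- ===== Notes on version B (the rewrite author's own statement) =====
-- stated objective: simpler
-- what changed: A keeps a per-signal array of change-timing indices and re-looks-up patterns[change[i]][signal] in the (mutated) dict at every step; B replaces that with a single running last-value dict carried across one pass over the timings, building fresh filtered rows instead of deleting in place.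
-- outside the precondition, e.g. on filterChanges({}): A raises ValueError, B raises KeyError
import Mathlib
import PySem

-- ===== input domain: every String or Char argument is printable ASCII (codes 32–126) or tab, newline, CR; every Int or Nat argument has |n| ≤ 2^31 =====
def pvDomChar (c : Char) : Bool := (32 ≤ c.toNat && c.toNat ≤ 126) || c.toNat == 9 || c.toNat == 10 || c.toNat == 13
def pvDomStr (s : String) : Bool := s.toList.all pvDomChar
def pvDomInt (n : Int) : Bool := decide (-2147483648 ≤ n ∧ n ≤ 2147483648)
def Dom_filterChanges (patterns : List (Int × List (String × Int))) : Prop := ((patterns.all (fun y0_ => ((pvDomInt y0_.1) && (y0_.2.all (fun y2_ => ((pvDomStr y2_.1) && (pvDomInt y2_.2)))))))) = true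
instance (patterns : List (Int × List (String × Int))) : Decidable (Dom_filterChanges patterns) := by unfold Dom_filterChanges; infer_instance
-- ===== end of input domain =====

-- B replaces A's per-signal change-index array (and its re-lookups into the mutated dict) by one
-- running last-value dict in a single pass, building fresh filtered rows; A mutates the input dict
-- in place while B does not — the equivalence proved here is about the RETURN value.


-- The Python values are nested dicts; both ports view the association lists as PySem.Dict
-- at the boundary (toD/ofD) and operate with the exact Python dict primitives.
def toD (patterns : List (Int × List (String × Int))) : PySem.Dict Int (PySem.Dict String Int) :=
  PySem.Dict.mk (patterns.map (fun p => (p.1, PySem.Dict.mk p.2)))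

def ofD (d : PySem.Dict Int (PySem.Dict String Int)) : List (Int × List (String × Int)) :=
  d.items.map (fun p => (p.1, p.2.items))

-- ===== PORT A =====
-- body of A's inner 'for i in range(0, arraySize)' loop
def stepInnerA (signals : List String) (t : Int)
    (st : PySem.Dict Int (PySem.Dict String Int) × List Int) (i : Nat) :
    PySem.Dict Int (PySem.Dict String Int) × List Int :=
  let pats := st.1
  let change := st.2
  let s := signals.getD i ""           -- signals[i], i < len(signals)
  if (pats.getD t PySem.Dict.empty).getD s 0
      == (pats.getD (change.getD i 0) PySem.Dict.empty).getD s 0 then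
    (pats.insert t ((pats.getD t PySem.Dict.empty).erase s), change)   -- del patterns[timing][signals[i]]
  else
    (pats, change.set i t)             -- change[i] = timing

-- body of A's outer 'for timing in timings' loop
def stepA (signals : List String)
    (st : PySem.Dict Int (PySem.Dict String Int) × List Int) (t : Int) :
    PySem.Dict Int (PySem.Dict String Int) × List Int :=
  (List.range signals.length).foldl (stepInnerA signals t) st

def filterChanges (patterns : List (Int × List (String × Int))) : List (Int × List (String × Int)) :=
  let pats := toD patterns
  match PySem.List.remove? pats.keys 0 with   -- timings = list(patterns.keys()); timings.remove(0)
  | none => patterns                          -- Python raises ValueError here (0 not a key): outside Pre_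
  | some timings =>
    let signals := (pats.getD 0 PySem.Dict.empty).keys   -- list(patterns[0].keys())
    let change := (List.range signals.length).map (fun _ => (0 : Int))  -- [0 for n in range(0,arraySize)]
    ofD (timings.foldl (stepA signals) (pats, change)).1

-- ===== PORT B =====
-- body of B's inner 'for k, v in patterns[timing].items()' loop
def rowStepB (st : PySem.Dict String Int × PySem.Dict String Int) (kv : String × Int) :
    PySem.Dict String Int × PySem.Dict String Int :=
  let kept := st.1
  let last := st.2
  if last.contains kv.1 && (kv.2 == last.getD kv.1 0) then st   -- unchanged: skip
  else
    (kept.insert kv.1 kv.2,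
     if last.contains kv.1 then last.insert kv.1 kv.2 else last)

-- body of B's outer 'for timing in timings' loop
def stepB (pats : PySem.Dict Int (PySem.Dict String Int))
    (st : PySem.Dict Int (PySem.Dict String Int) × PySem.Dict String Int) (t : Int) :
    PySem.Dict Int (PySem.Dict String Int) × PySem.Dict String Int :=
  let kl := (pats.getD t PySem.Dict.empty).items.foldl rowStepB (PySem.Dict.empty, st.2)
  (st.1.insert t kl.1, kl.2)

def filterChanges_alt (patterns : List (Int × List (String × Int))) : List (Int × List (String × Int)) :=
  let pats := toD patterns
  let timings := pats.keys.filter (fun t => !(t == 0))   -- [t for t in patterns if t != 0]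
  let last := pats.getD 0 PySem.Dict.empty               -- last = dict(patterns[0])
  ofD (timings.foldl (stepB pats) (pats, last)).1        -- result = dict(patterns); loop; return result

-- ===== PRECONDITION & SPEC =====
-- Pre_ excludes (a) inputs where the Python A raises: 0 not a key (ValueError/KeyError) or a key of
-- patterns[0] missing from some row (KeyError); and (b) association lists with duplicate top-level
-- or row keys, which do not denote a Python dict unambiguously (the dict collapses the duplicates).
def Pre_filterChanges (patterns : List (Int × List (String × Int))) : Prop :=
  (patterns.map Prod.fst).Nodup ∧
  (0 : Int) ∈ patterns.map Prod.fst ∧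
  (∀ p ∈ patterns, (p.2.map Prod.fst).Nodup) ∧
  (∀ z ∈ patterns, z.1 = 0 → ∀ p ∈ patterns, ∀ r ∈ z.2, r.1 ∈ p.2.map Prod.fst)
instance (patterns : List (Int × List (String × Int))) : Decidable (Pre_filterChanges patterns) := by
  unfold Pre_filterChanges; infer_instance

def pvWitness_filterChanges : (List (Int × List (String × Int))) :=
  [(0, [("a", 1), ("b", 2)]), (5, [("a", 1), ("b", 3)]), (9, [("a", 1), ("b", 3)])]

def Spec_filterChanges (patterns : List (Int × List (String × Int))) (out : List (Int × List (String × Int))) : Prop := out = filterChanges_alt patterns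
instance (patterns : List (Int × List (String × Int))) (out : List (Int × List (String × Int))) : Decidable (Spec_filterChanges patterns out) := by unfold Spec_filterChanges; infer_instance

-- ===== CLAIM (what is proved, stated in full; the proofs are below) =====
def Claim_equal_filterChanges : Prop := ∀ (patterns : List (Int × List (String × Int))), Dom_filterChanges patterns → Pre_filterChanges patterns → Spec_filterChanges patterns (filterChanges patterns)

-- ===== LEMMAS AND PROOFS =====

-- ---- proof-only definitions: closed forms of the two inner loops ----

-- keys deleted by A's inner loop after n steps (V i = row value of signal i, L i = last value)
def delKeys (S : List String) (V L : Nat → Int) (n : Nat) : List String :=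
  (List.range n).filterMap (fun i => if V i == L i then some (S.getD i "") else none)

def rowFilt (row : PySem.Dict String Int) (ds : List String) : PySem.Dict String Int :=
  PySem.Dict.mk (row.items.filter (fun kv => !ds.contains kv.1))

-- A's change array after n inner steps
def chUpd (t : Int) (V L : Nat → Int) (c : List Int) (n : Nat) : List Int :=
  (List.range n).foldl (fun c i => if V i == L i then c else c.set i t) c

-- ---- generic dict facts ----

theorem get?_mk_filter_key {kappa nu : Type} [BEq kappa] [LawfulBEq kappa] (q : kappa → Bool)
    (l : List (kappa × nu)) (k : kappa) :
    (PySem.Dict.mk (l.filter (fun kv => q kv.1))).get? k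
      = if q k then (PySem.Dict.mk l).get? k else none := by
  induction l with
  | nil => simp [PySem.Dict.get?]
  | cons a tl ih =>
    by_cases hqa : q a.1
    · by_cases hk : a.1 == k
      · have hak : a.1 = k := eq_of_beq hk
        subst hak
        rw [List.filter_cons, if_pos hqa, PySem.Dict.get?_mk_cons, PySem.Dict.get?_mk_cons]
        simp [hqa]
      · rw [List.filter_cons, if_pos hqa, PySem.Dict.get?_mk_cons, PySem.Dict.get?_mk_cons]
        simp only [hk]
        exact ih
    · by_cases hk : a.1 == k
      · have hak : a.1 = k := eq_of_beq hk
        subst hak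
        rw [List.filter_cons, if_neg (by simp [hqa]), ih]
        simp [hqa]
      · rw [List.filter_cons, if_neg (by simp [hqa]), ih, PySem.Dict.get?_mk_cons]
        simp [hk]

theorem getD_rowFilt_of_not_contains (row : PySem.Dict String Int) (ds : List String) (k : String)
    (h : ds.contains k = false) (d : Int) : (rowFilt row ds).getD k d = row.getD k d := by
  rw [PySem.Dict.getD_eq_get?_getD, PySem.Dict.getD_eq_get?_getD]
  unfold rowFilt
  rw [get?_mk_filter_key (fun x => !ds.contains x) row.items k]
  have hk : k ∉ ds := by simpa using h
  simp [hk]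

theorem erase_rowFilt (row : PySem.Dict String Int) (ds : List String) (s : String) :
    (rowFilt row ds).erase s = rowFilt row (ds ++ [s]) := by
  unfold rowFilt PySem.Dict.erase
  simp only [List.filter_filter]
  congr 1
  apply List.filter_congr
  intro kv _
  by_cases h1 : kv.1 ∈ ds <;> by_cases h2 : kv.1 = s <;> simp [h1, h2]

theorem rowFilt_nil (row : PySem.Dict String Int) : rowFilt row [] = row := by
  apply PySem.Dict.ext
  simp [rowFilt]

theorem insert_getD_self {kappa nu : Type} [BEq kappa] [LawfulBEq kappa]
    (d : PySem.Dict kappa nu) (k : kappa) (v0 : nu)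
    (hnd : d.keys.Nodup) (hc : d.contains k = true) :
    d.insert k (d.getD k v0) = d := by
  apply PySem.Dict.ext
  rw [PySem.Dict.items_insert, if_pos hc]
  conv_rhs => rw [← List.map_id d.items]
  apply List.map_congr_left
  intro p hp
  by_cases hpk : p.1 == k
  · have hk : p.1 = k := eq_of_beq hpk
    have hget : d.getD p.1 v0 = p.2 := by
      have : (p.1, p.2) ∈ d.items := by simpa using hp
      exact PySem.Dict.getD_of_mem_items d this hnd v0
    simp [← hk, hget]
  · simp [hpk]

theorem contains_false_of_not_mem {x : String} {l : List String} (h : x ∉ l) :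
    l.contains x = false := by simpa using h

theorem dcontains_of_mem_keys {kappa nu : Type} [BEq kappa] [LawfulBEq kappa]
    (d : PySem.Dict kappa nu) (k : kappa) (h : k ∈ d.keys) : d.contains k = true := by
  rw [PySem.Dict.contains_iff_mem_keys]
  exact h

theorem mem_keys_of_dcontains {kappa nu : Type} [BEq kappa] [LawfulBEq kappa]
    (d : PySem.Dict kappa nu) (k : kappa) (h : d.contains k = true) : k ∈ d.keys := by
  rw [PySem.Dict.contains_iff_mem_keys] at h
  exact h

-- ---- delKeys facts ----

theorem mem_delKeys {S : List String} {V L : Nat → Int} {n : Nat} {x : String} :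
    x ∈ delKeys S V L n ↔ ∃ i, i < n ∧ (V i == L i) = true ∧ S.getD i "" = x := by
  unfold delKeys
  rw [List.mem_filterMap]
  constructor
  · rintro ⟨i, hi, hf⟩
    rw [List.mem_range] at hi
    by_cases hb : (V i == L i) = true
    · rw [if_pos hb] at hf
      exact ⟨i, hi, hb, Option.some.inj hf⟩
    · rw [if_neg hb] at hf
      cases hf
  · rintro ⟨i, hi, hb, hx⟩
    exact ⟨i, List.mem_range.mpr hi, by rw [if_pos hb, hx]⟩

theorem not_mem_delKeys {S : List String} (hSnd : S.Nodup) {V L : Nat → Int} {n i : Nat}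
    (hi : i < S.length) (hn : n ≤ S.length) (h : n ≤ i ∨ (V i == L i) = false) :
    S.getD i "" ∉ delKeys S V L n := by
  intro hmem
  obtain ⟨j, hj, hbj, hSj⟩ := mem_delKeys.mp hmem
  have hjlen : j < S.length := lt_of_lt_of_le hj hn
  have hji : j = i := by
    have hgj : S.getD j "" = S[j] := List.getD_eq_getElem S "" hjlen
    have hgi : S.getD i "" = S[i] := List.getD_eq_getElem S "" hi
    have : S[j] = S[i] := by rw [← hgj, ← hgi, hSj]
    exact (List.Nodup.getElem_inj_iff hSnd).mp this
  subst hji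
  rcases h with h | h
  · omega
  · rw [h] at hbj; cases hbj

theorem delKeys_succ (S : List String) (V L : Nat → Int) (n : Nat) :
    delKeys S V L (n+1)
      = delKeys S V L n ++ (if (V n == L n) = true then [S.getD n ""] else []) := by
  unfold delKeys
  rw [List.range_succ, List.filterMap_append]
  congr 1
  by_cases hb : (V n == L n) = true
  · rw [if_pos hb]
    have hv : V n = L n := eq_of_beq hb
    simp [hv]
  · rw [if_neg hb]
    rw [Bool.not_eq_true] at hb
    have hv : ¬ V n = L n := by intro h; rw [h] at hb; simp at hb
    simp [hv]

-- ---- chUpd facts ----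

theorem chUpd_zero (t : Int) (V L : Nat → Int) (c : List Int) : chUpd t V L c 0 = c := rfl

theorem chUpd_succ (t : Int) (V L : Nat → Int) (c : List Int) (n : Nat) :
    chUpd t V L c (n+1)
      = if V n == L n then chUpd t V L c n else (chUpd t V L c n).set n t := by
  unfold chUpd
  rw [List.range_succ, List.foldl_append]
  rfl

theorem chUpd_length (t : Int) (V L : Nat → Int) (c : List Int) (n : Nat) :
    (chUpd t V L c n).length = c.length := by
  induction n with
  | zero => rfl
  | succ n ih =>
    rw [chUpd_succ]
    by_cases hb : (V n == L n) = true <;> simp [hb, List.length_set, ih]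

theorem chUpd_getD (t : Int) (V L : Nat → Int) (c : List Int) (n i : Nat) :
    (chUpd t V L c n).getD i 0
      = if i < n ∧ i < c.length ∧ (V i == L i) = false then t else c.getD i 0 := by
  induction n with
  | zero =>
    rw [chUpd_zero, if_neg]
    rintro ⟨h, -⟩
    omega
  | succ n ih =>
    rw [chUpd_succ]
    by_cases hb : (V n == L n) = true
    · rw [if_pos hb, ih]
      by_cases hin : i = n
      · subst hin
        rw [if_neg (by rintro ⟨h, -⟩; omega), if_neg (by rintro ⟨-, -, h⟩; rw [hb] at h; cases h)]
      · by_cases hcond : i < n ∧ i < c.length ∧ (V i == L i) = false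
        · rw [if_pos hcond, if_pos ⟨by omega, hcond.2⟩]
        · rw [if_neg hcond, if_neg (by rintro ⟨h1, h2⟩; exact hcond ⟨by omega, h2⟩)]
    · rw [if_neg hb]
      by_cases hin : i = n
      · subst hin
        by_cases hlen : i < c.length
        · rw [List.getD_eq_getElem?_getD, List.getElem?_set_self (by rw [chUpd_length]; exact hlen)]
          rw [if_pos ⟨by omega, hlen, Bool.eq_false_iff.mpr (by simpa using hb)⟩]
          rfl
        · rw [List.getD_eq_getElem?_getD, List.getElem?_eq_none (by rw [List.length_set, chUpd_length]; omega)]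
          rw [if_neg (by rintro ⟨-, h, -⟩; omega)]
          rw [List.getD_eq_getElem?_getD, List.getElem?_eq_none (by omega)]
      · rw [List.getD_eq_getElem?_getD, List.getElem?_set_ne (by omega), ← List.getD_eq_getElem?_getD, ih]
        by_cases hcond : i < n ∧ i < c.length ∧ (V i == L i) = false
        · rw [if_pos hcond, if_pos ⟨by omega, hcond.2⟩]
        · rw [if_neg hcond, if_neg (by rintro ⟨h1, h2⟩; exact hcond ⟨by omega, h2⟩)]

theorem zeros_getD (n i : Nat) : ((List.range n).map (fun _ => (0 : Int))).getD i 0 = 0 := by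
  rw [List.getD_eq_getElem?_getD, List.getElem?_map]
  cases (List.range n)[i]? <;> rfl


-- ---- A's inner loop: closed form ----

theorem innerA_char (S : List String) (hSnd : S.Nodup) (t : Int)
    (pats0 : PySem.Dict Int (PySem.Dict String Int)) (change0 : List Int)
    (hnd0 : pats0.keys.Nodup) (hct : pats0.contains t = true)
    (V L : Nat → Int)
    (hV : ∀ i, i < S.length → (pats0.getD t PySem.Dict.empty).getD (S.getD i "") 0 = V i)
    (hL : ∀ i, i < S.length →
        (pats0.getD (change0.getD i 0) PySem.Dict.empty).getD (S.getD i "") 0 = L i)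
    (hchne : ∀ i, change0.getD i 0 ≠ t) :
    ∀ n, n ≤ S.length →
    (List.range n).foldl (stepInnerA S t) (pats0, change0)
      = (pats0.insert t (rowFilt (pats0.getD t PySem.Dict.empty) (delKeys S V L n)),
         chUpd t V L change0 n) := by
  intro n
  induction n with
  | zero =>
    intro _
    rw [List.range_zero, List.foldl_nil, chUpd_zero]
    have hd : delKeys S V L 0 = [] := rfl
    rw [hd, rowFilt_nil, insert_getD_self pats0 t PySem.Dict.empty hnd0 hct]
  | succ n ih =>
    intro hn1
    have hn : n ≤ S.length := Nat.le_of_succ_le hn1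
    have hlt : n < S.length := hn1
    rw [List.range_succ, List.foldl_append, ih hn, List.foldl_cons, List.foldl_nil]
    simp only [stepInnerA]
    have f1 : ((pats0.insert t (rowFilt (pats0.getD t PySem.Dict.empty) (delKeys S V L n))).getD t
        PySem.Dict.empty) = rowFilt (pats0.getD t PySem.Dict.empty) (delKeys S V L n) :=
      PySem.Dict.getD_insert_self ..
    have f2 : (delKeys S V L n).contains (S.getD n "") = false :=
      contains_false_of_not_mem (not_mem_delKeys hSnd hlt hn (Or.inl le_rfl))
    have f3 : (rowFilt (pats0.getD t PySem.Dict.empty) (delKeys S V L n)).getD (S.getD n "") 0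
        = V n := by
      rw [getD_rowFilt_of_not_contains _ _ _ f2]
      exact hV n hlt
    have f4 : (chUpd t V L change0 n).getD n 0 = change0.getD n 0 := by
      rw [chUpd_getD, if_neg]
      rintro ⟨h, -⟩
      omega
    have f5 : ((pats0.insert t (rowFilt (pats0.getD t PySem.Dict.empty) (delKeys S V L n))).getD
          (change0.getD n 0) PySem.Dict.empty)
        = pats0.getD (change0.getD n 0) PySem.Dict.empty :=
      PySem.Dict.getD_insert_of_ne _ _ _ (hchne n)
    rw [f1, f4, f5, f3, hL n hlt]
    by_cases hb : (V n == L n) = true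
    · rw [if_pos hb, PySem.Dict.insert_insert_self, erase_rowFilt, delKeys_succ, if_pos hb,
        chUpd_succ, if_pos hb]
    · rw [if_neg hb, delKeys_succ, if_neg hb, List.append_nil, chUpd_succ,
        if_neg hb]

-- ---- B's inner loop: closed form ----

theorem innerB_char (l : List (String × Int)) :
    ∀ (kept last : PySem.Dict String Int),
    (l.map Prod.fst).Nodup → (∀ kv ∈ l, kept.contains kv.1 = false) →
    ∃ L2, l.foldl rowStepB (kept, last)
        = (PySem.Dict.mk (kept.items ++ l.filter
            (fun kv => !(last.contains kv.1 && (kv.2 == last.getD kv.1 0)))), L2)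
      ∧ L2.keys = last.keys
      ∧ (∀ k, last.contains k = true →
            L2.getD k 0 = (PySem.Dict.mk l).getD k (last.getD k 0)) := by
  induction l with
  | nil =>
    intro kept last _ _
    refine ⟨last, by simp, rfl, fun k _ => ?_⟩
    simp [PySem.Dict.getD_eq_get?_getD, PySem.Dict.get?]
  | cons kv tl ih =>
    obtain ⟨a, b⟩ := kv
    intro kept last hnd hkc
    have hh : a ∉ tl.map Prod.fst := (List.nodup_cons.mp hnd).1
    have hndt : (tl.map Prod.fst).Nodup := (List.nodup_cons.mp hnd).2
    rw [List.foldl_cons]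
    by_cases hc : (last.contains a && (b == last.getD a 0)) = true
    · have hstep : rowStepB (kept, last) (a, b) = (kept, last) := by
        simp only [rowStepB]
        rw [if_pos hc]
      rw [hstep]
      obtain ⟨L2, heq, hk2, hg2⟩ :=
        ih kept last hndt (fun kv' h' => hkc kv' (List.mem_cons_of_mem _ h'))
      refine ⟨L2, ?_, hk2, ?_⟩
      · rw [heq]
        congr 2
        rw [List.filter_cons, if_neg (by simp [hc])]
      · intro k hk
        rw [hg2 k hk]
        by_cases hkk : a = k
        · subst hkk
          have h2 : (PySem.Dict.mk tl).get? a = none :=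
            (PySem.Dict.get?_eq_none_iff_not_mem_keys _ _).mpr (by simpa [PySem.Dict.keys] using hh)
          have hcs : last.contains a = true ∧ (b == last.getD a 0) = true := by
            simpa using hc
          have hbv : b = last.getD a 0 := eq_of_beq hcs.2
          have hbv2 : (last.get? a).getD 0 = b := by
            rw [← PySem.Dict.getD_eq_get?_getD]
            exact hbv.symm
          simp [PySem.Dict.getD_eq_get?_getD, PySem.Dict.get?_mk_cons, h2, hbv2]
        · simp [PySem.Dict.getD_eq_get?_getD, PySem.Dict.get?_mk_cons, hkk]
    · have hstep : rowStepB (kept, last) (a, b)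
          = (kept.insert a b, if last.contains a = true then last.insert a b else last) := by
        simp only [rowStepB]
        rw [if_neg hc]
      rw [hstep]
      have hkca : kept.contains a = false := hkc (a, b) (List.mem_cons_self ..)
      have hcont' : ∀ k, (if last.contains a = true then last.insert a b else last).contains k
          = last.contains k := by
        intro k
        by_cases h : last.contains a = true
        · rw [if_pos h, PySem.Dict.contains_insert]
          by_cases hka : k = a
          · subst hka
            simp [h]
          · simp [hka]
        · rw [if_neg h]
      have hkeys' : (if last.contains a = true then last.insert a b else last).keys
          = last.keys := by
        by_cases h : last.contains a = true
        · rw [if_pos h, PySem.Dict.keys_insert_of_contains _ _ h]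
        · rw [if_neg h]
      have hgetne : ∀ k, k ≠ a →
          (if last.contains a = true then last.insert a b else last).getD k 0
            = last.getD k 0 := by
        intro k hk
        by_cases h : last.contains a = true
        · rw [if_pos h]
          exact PySem.Dict.getD_insert_of_ne _ _ _ hk
        · rw [if_neg h]
      obtain ⟨L2, heq, hk2, hg2⟩ :=
        ih (kept.insert a b) (if last.contains a = true then last.insert a b else last) hndt
          (fun kv' h' => by
            rw [PySem.Dict.contains_insert]
            have : (kv'.1 == a) = false := by
              have : kv'.1 ≠ a := fun e => hh (e ▸ List.mem_map_of_mem h')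
              simp [this]
            rw [this, Bool.false_or]
            exact hkc kv' (List.mem_cons_of_mem _ h'))
      refine ⟨L2, ?_, by rw [hk2, hkeys'], ?_⟩
      · rw [heq]
        congr 1
        rw [PySem.Dict.items_insert_of_not_contains _ _ hkca, List.append_assoc]
        congr 1
        have hcf : (last.contains a && (b == last.getD a 0)) = false := by
          cases hx : (last.contains a && (b == last.getD a 0))
          · rfl
          · exact absurd hx hc
        have hcond : (!(last.contains (a, b).1 && ((a, b).2 == last.getD (a, b).1 0))) = true := by
          show (!(last.contains a && (b == last.getD a 0))) = true
          rw [hcf]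
          rfl
        rw [List.filter_cons, if_pos hcond, List.singleton_append]
        congr 1
        congr 1
        apply List.filter_congr
        intro kv' h'
        have hne : kv'.1 ≠ a := fun e => hh (e ▸ List.mem_map_of_mem h')
        rw [hcont' kv'.1, hgetne kv'.1 hne]
      · intro k hk
        have hk' : (if last.contains a = true then last.insert a b else last).contains k = true := by
          rw [hcont']
          exact hk
        rw [hg2 k hk']
        by_cases hka : k = a
        · subst hka
          have hl : (if last.contains k = true then last.insert k b else last)
              = last.insert k b := by rw [if_pos hk]
          have h2 : (PySem.Dict.mk tl).get? k = none :=
            (PySem.Dict.get?_eq_none_iff_not_mem_keys _ _).mpr (by simpa [PySem.Dict.keys] using hh)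
          rw [hl]
          simp [PySem.Dict.getD_eq_get?_getD, PySem.Dict.get?_mk_cons, h2,
            PySem.Dict.get?_insert_self]
        · have hne : k ≠ a := hka
          rw [hgetne k hne]
          have hne2 : ¬ a = k := fun e => hne e.symm
          simp [PySem.Dict.getD_eq_get?_getD, PySem.Dict.get?_mk_cons, hne2]

-- ---- the two per-timing rows coincide ----

theorem rowA_eq_rowB (S : List String) (hSnd : S.Nodup)
    (row last : PySem.Dict String Int) (hrnd : row.keys.Nodup) (hlk : last.keys = S)
    (V L : Nat → Int)
    (hV : ∀ i, i < S.length → row.getD (S.getD i "") 0 = V i)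
    (hL : ∀ i, i < S.length → last.getD (S.getD i "") 0 = L i) :
    rowFilt row (delKeys S V L S.length)
      = PySem.Dict.mk (row.items.filter
          (fun kv => !(last.contains kv.1 && (kv.2 == last.getD kv.1 0)))) := by
  unfold rowFilt
  congr 1
  apply List.filter_congr
  intro kv hkv
  congr 1
  by_cases hmem : kv.1 ∈ S
  · obtain ⟨i, hi, hSi⟩ := List.mem_iff_getElem.mp hmem
    have hgd : S.getD i "" = kv.1 := by rw [List.getD_eq_getElem S "" hi, hSi]
    have hlc : last.contains kv.1 = true :=
      dcontains_of_mem_keys _ _ (by rw [hlk]; exact hmem)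
    have hval : row.getD kv.1 0 = kv.2 := PySem.Dict.getD_of_mem_items row hkv hrnd 0
    have hVi : V i = kv.2 := by rw [← hV i hi, hgd, hval]
    have hLi : last.getD kv.1 0 = L i := by rw [← hgd]; exact hL i hi
    by_cases hb : (V i == L i) = true
    · have hmem2 : kv.1 ∈ delKeys S V L S.length := mem_delKeys.mpr ⟨i, hi, hb, hgd⟩
      have hcd : (delKeys S V L S.length).contains kv.1 = true := by simpa using hmem2
      rw [hcd, hlc, Bool.true_and]
      have hvv : kv.2 = last.getD kv.1 0 := by
        rw [← hVi, hLi]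
        exact eq_of_beq hb
      exact (beq_iff_eq.mpr hvv).symm
    · have hnmem : kv.1 ∉ delKeys S V L S.length := by
        rw [← hgd]
        exact not_mem_delKeys hSnd hi le_rfl (Or.inr (Bool.not_eq_true _ ▸ Bool.eq_false_iff.mpr (by simpa using hb)))
      rw [contains_false_of_not_mem hnmem, hlc, Bool.true_and]
      have hvv : ¬ kv.2 = last.getD kv.1 0 := by
        intro h
        exact hb (beq_iff_eq.mpr (by rw [← hVi] at h; rw [h, hLi]))
      exact (by simp [hvv] : (kv.2 == last.getD kv.1 0) = false).symm
  · have h1 : (delKeys S V L S.length).contains kv.1 = false :=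
      contains_false_of_not_mem (fun hmem2 => by
        obtain ⟨j, hj, -, hSj⟩ := mem_delKeys.mp hmem2
        exact hmem (by rw [← hSj, List.getD_eq_getElem S "" hj]; exact List.getElem_mem _))
    have h2 : last.contains kv.1 = false := by
      rw [← Bool.not_eq_true]
      intro hcc
      exact hmem (hlk ▸ mem_keys_of_dcontains _ _ hcc)
    rw [h1, h2, Bool.false_and]

-- ---- outer loop: both folds keep equal pattern dicts ----

theorem outerEq (P : PySem.Dict Int (PySem.Dict String Int)) (S : List String)
    (hSnd : S.Nodup) (hPnd : P.keys.Nodup)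
    (hrows : ∀ t ∈ P.keys, (P.getD t PySem.Dict.empty).keys.Nodup
        ∧ ∀ s ∈ S, (P.getD t PySem.Dict.empty).contains s = true) :
    ∀ (ts : List Int) (pats : PySem.Dict Int (PySem.Dict String Int)) (change : List Int)
      (last : PySem.Dict String Int),
    ts.Nodup → (∀ t ∈ ts, t ∈ P.keys ∧ t ≠ 0) →
    pats.keys = P.keys →
    (∀ t ∈ ts, pats.getD t PySem.Dict.empty = P.getD t PySem.Dict.empty) →
    change.length = S.length →
    (∀ i, change.getD i 0 ∉ ts) →
    last.keys = S →
    (∀ i, i < S.length →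
        (pats.getD (change.getD i 0) PySem.Dict.empty).getD (S.getD i "") 0
          = last.getD (S.getD i "") 0) →
    (ts.foldl (stepA S) (pats, change)).1 = (ts.foldl (stepB P) (pats, last)).1 := by
  intro ts
  induction ts with
  | nil =>
    intro pats change last _ _ _ _ _ _ _ _
    rfl
  | cons t ts ih =>
    intro pats change last hnd hmem hkeys hrow hlen hch hlk hlast
    obtain ⟨htP, ht0⟩ := hmem t (List.mem_cons_self ..)
    have hrowp : pats.getD t PySem.Dict.empty = P.getD t PySem.Dict.empty :=
      hrow t (List.mem_cons_self ..)
    have hrnd : (P.getD t PySem.Dict.empty).keys.Nodup := (hrows t htP).1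
    have hsub := (hrows t htP).2
    have hct : pats.contains t = true :=
      dcontains_of_mem_keys _ _ (by rw [hkeys]; exact htP)
    have hndp : pats.keys.Nodup := by rw [hkeys]; exact hPnd
    have hchne : ∀ i, change.getD i 0 ≠ t :=
      fun i e => (hch i) (e ▸ List.mem_cons_self ..)
    have hA : stepA S (pats, change) t
        = (pats.insert t (rowFilt (P.getD t PySem.Dict.empty)
            (delKeys S (fun i => (P.getD t PySem.Dict.empty).getD (S.getD i "") 0)
              (fun i => last.getD (S.getD i "") 0) S.length)),
           chUpd t (fun i => (P.getD t PySem.Dict.empty).getD (S.getD i "") 0)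
              (fun i => last.getD (S.getD i "") 0) change S.length) := by
      unfold stepA
      rw [innerA_char S hSnd t pats change hndp hct
        (fun i => (P.getD t PySem.Dict.empty).getD (S.getD i "") 0)
        (fun i => last.getD (S.getD i "") 0)
        (fun i hi => by rw [hrowp])
        (fun i hi => hlast i hi)
        hchne S.length le_rfl, hrowp]
    obtain ⟨L2, hBeq, hk2, hg2⟩ := innerB_char (P.getD t PySem.Dict.empty).items
      PySem.Dict.empty last hrnd (fun kv _ => PySem.Dict.contains_empty ..)
    have hB : stepB P (pats, last) t
        = (pats.insert t (rowFilt (P.getD t PySem.Dict.empty)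
            (delKeys S (fun i => (P.getD t PySem.Dict.empty).getD (S.getD i "") 0)
              (fun i => last.getD (S.getD i "") 0) S.length)), L2) := by
      simp only [stepB, hBeq]
      have hemp : (PySem.Dict.empty : PySem.Dict String Int).items = [] := rfl
      rw [hemp, List.nil_append, ← rowA_eq_rowB S hSnd (P.getD t PySem.Dict.empty) last hrnd hlk
        (fun i => (P.getD t PySem.Dict.empty).getD (S.getD i "") 0)
        (fun i => last.getD (S.getD i "") 0)
        (fun i hi => rfl) (fun i hi => rfl)]
    rw [List.foldl_cons, List.foldl_cons, hA, hB]
    apply ih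
    · exact (List.nodup_cons.mp hnd).2
    · exact fun t' h' => hmem t' (List.mem_cons_of_mem _ h')
    · rw [PySem.Dict.keys_insert_of_contains _ _ hct]
      exact hkeys
    · intro t' ht'
      have htne : t' ≠ t := fun e => (List.nodup_cons.mp hnd).1 (e ▸ ht')
      rw [PySem.Dict.getD_insert_of_ne _ _ _ htne]
      exact hrow t' (List.mem_cons_of_mem _ ht')
    · rw [chUpd_length]
      exact hlen
    · intro i
      rw [chUpd_getD]
      by_cases h : i < S.length ∧ i < change.length ∧
          (((P.getD t PySem.Dict.empty).getD (S.getD i "") 0 == last.getD (S.getD i "") 0) = false)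
      · rw [if_pos h]
        exact (List.nodup_cons.mp hnd).1
      · rw [if_neg h]
        exact fun hm => hch i (List.mem_cons_of_mem _ hm)
    · rw [hk2]
      exact hlk
    · intro i hi
      have hsmem : S.getD i "" ∈ S := by
        rw [List.getD_eq_getElem S "" hi]
        exact List.getElem_mem _
      have hcontlast : last.contains (S.getD i "") = true :=
        dcontains_of_mem_keys _ _ (by rw [hlk]; exact hsmem)
      have hrc : (P.getD t PySem.Dict.empty).contains (S.getD i "") = true := hsub _ hsmem
      obtain ⟨v, hv⟩ : ∃ v, (P.getD t PySem.Dict.empty).get? (S.getD i "") = some v := by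
        rw [PySem.Dict.contains_eq_isSome_get?] at hrc
        exact Option.isSome_iff_exists.mp hrc
      have hrowv : ∀ d0 : Int, (P.getD t PySem.Dict.empty).getD (S.getD i "") d0 = v :=
        fun d0 => PySem.Dict.getD_of_get?_eq_some _ _ hv
      have hRHS : L2.getD (S.getD i "") 0 = v := by
        rw [hg2 _ hcontlast]
        have hmkeq : PySem.Dict.mk (P.getD t PySem.Dict.empty).items = P.getD t PySem.Dict.empty := rfl
        rw [hmkeq, hrowv]
      rw [hRHS, chUpd_getD]
      have hilen : i < change.length := by rw [hlen]; exact hi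
      by_cases hb : (((P.getD t PySem.Dict.empty).getD (S.getD i "") 0
          == last.getD (S.getD i "") 0) = false)
      · rw [if_pos ⟨hi, hilen, hb⟩, PySem.Dict.getD_insert_self]
        have hnm : S.getD i "" ∉ delKeys S
            (fun i => (P.getD t PySem.Dict.empty).getD (S.getD i "") 0)
            (fun i => last.getD (S.getD i "") 0) S.length :=
          not_mem_delKeys hSnd hi le_rfl (Or.inr hb)
        rw [getD_rowFilt_of_not_contains _ _ _ (contains_false_of_not_mem hnm), hrowv]
      · rw [if_neg (by rintro ⟨-, -, h⟩; exact hb h)]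
        rw [PySem.Dict.getD_insert_of_ne _ _ _ (hchne i), hlast i hi]
        have hbt : ((P.getD t PySem.Dict.empty).getD (S.getD i "") 0
            == last.getD (S.getD i "") 0) = true := by
          cases hx : ((P.getD t PySem.Dict.empty).getD (S.getD i "") 0
              == last.getD (S.getD i "") 0)
          · exact absurd hx hb
          · rfl
        have := eq_of_beq hbt
        rw [← this, hrowv]

-- ---- boundary lemmas about toD ----

theorem toD_keys (ps : List (Int × List (String × Int))) :
    (toD ps).keys = ps.map Prod.fst := by
  simp [toD, PySem.Dict.keys]

theorem toD_get?_of_mem (ps : List (Int × List (String × Int))) (t : Int) :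
    t ∈ ps.map Prod.fst →
    ∃ p, p ∈ ps ∧ p.1 = t ∧ (toD ps).get? t = some (PySem.Dict.mk p.2) := by
  induction ps with
  | nil => simp
  | cons q ps ih =>
    intro hmem
    by_cases hq : q.1 = t
    · refine ⟨q, List.mem_cons_self .., hq, ?_⟩
      unfold toD
      rw [List.map_cons, PySem.Dict.get?_mk_cons, if_pos (by simp [hq])]
    · have hmem' : t ∈ ps.map Prod.fst := by
        rw [List.map_cons] at hmem
        rcases List.mem_cons.mp hmem with h | h
        · exact absurd h.symm hq
        · exact h
      obtain ⟨p, hp, hpt, hget⟩ := ih hmem'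
      refine ⟨p, List.mem_cons_of_mem _ hp, hpt, ?_⟩
      unfold toD at hget ⊢
      rw [List.map_cons, PySem.Dict.get?_mk_cons, if_neg (by simp [hq])]
      exact hget

-- ---- assembling ----

theorem mainEq (patterns : List (Int × List (String × Int)))
    (hpre : Pre_filterChanges patterns) :
    filterChanges patterns = filterChanges_alt patterns := by
  obtain ⟨h1, h2, h3, h4⟩ := hpre
  obtain ⟨z, hz, hz0, hzget⟩ := toD_get?_of_mem patterns 0 h2
  have hkeys : (toD patterns).keys = patterns.map Prod.fst := toD_keys patterns
  have hPnd : (toD patterns).keys.Nodup := by rw [hkeys]; exact h1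
  have hrow0 : (toD patterns).getD 0 PySem.Dict.empty = PySem.Dict.mk z.2 :=
    PySem.Dict.getD_of_get?_eq_some _ _ hzget
  have hSz : ((toD patterns).getD 0 PySem.Dict.empty).keys = z.2.map Prod.fst := by
    rw [hrow0]
    rfl
  have hSnd : ((toD patterns).getD 0 PySem.Dict.empty).keys.Nodup := by
    rw [hSz]
    exact h3 z hz
  have hrows : ∀ t ∈ (toD patterns).keys,
      ((toD patterns).getD t PySem.Dict.empty).keys.Nodup
        ∧ ∀ s ∈ ((toD patterns).getD 0 PySem.Dict.empty).keys,
            ((toD patterns).getD t PySem.Dict.empty).contains s = true := by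
    intro t ht
    rw [hkeys] at ht
    obtain ⟨p, hp, hpt, hget⟩ := toD_get?_of_mem patterns t ht
    have hgd : (toD patterns).getD t PySem.Dict.empty = PySem.Dict.mk p.2 :=
      PySem.Dict.getD_of_get?_eq_some _ _ hget
    constructor
    · rw [hgd]
      exact h3 p hp
    · intro s hs
      rw [hSz] at hs
      obtain ⟨r, hr, hrs⟩ := List.mem_map.mp hs
      have hin : r.1 ∈ p.2.map Prod.fst := h4 z hz hz0 p hp r hr
      rw [hgd]
      apply dcontains_of_mem_keys
      show s ∈ (PySem.Dict.mk p.2).keys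
      have : (PySem.Dict.mk p.2).keys = p.2.map Prod.fst := rfl
      rw [this, ← hrs]
      exact hin
  have hrm : PySem.List.remove? (toD patterns).keys 0
      = some ((toD patterns).keys.filter (fun t => !(t == 0))) := by
    rw [PySem.List.remove?_eq_some_erase (toD patterns).keys 0 (by rw [hkeys]; exact h2)]
    congr 1
    rw [List.Nodup.erase_eq_filter hPnd 0]
    apply List.filter_congr
    intro x _
    rfl
  have hts_nd : ((toD patterns).keys.filter (fun t => !(t == 0))).Nodup :=
    List.Nodup.filter _ hPnd
  have hts_mem : ∀ t ∈ (toD patterns).keys.filter (fun t => !(t == 0)),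
      t ∈ (toD patterns).keys ∧ t ≠ 0 := by
    intro t ht
    have := List.mem_filter.mp ht
    refine ⟨this.1, ?_⟩
    have := this.2
    simpa using this
  have h0nts : ∀ i : Nat, ((List.range ((toD patterns).getD 0 PySem.Dict.empty).keys.length).map
      (fun _ => (0 : Int))).getD i 0 ∉ (toD patterns).keys.filter (fun t => !(t == 0)) := by
    intro i hm
    rw [zeros_getD] at hm
    have := (List.mem_filter.mp hm).2
    simp at this
  have hmain := outerEq (toD patterns) ((toD patterns).getD 0 PySem.Dict.empty).keys hSnd hPnd hrows
    ((toD patterns).keys.filter (fun t => !(t == 0)))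
    (toD patterns)
    ((List.range ((toD patterns).getD 0 PySem.Dict.empty).keys.length).map (fun _ => (0 : Int)))
    ((toD patterns).getD 0 PySem.Dict.empty)
    hts_nd hts_mem rfl (fun t _ => rfl) (by simp) h0nts rfl
    (fun i hi => by rw [zeros_getD])
  show filterChanges patterns = filterChanges_alt patterns
  simp only [filterChanges, filterChanges_alt]
  rw [hrm]
  exact congrArg ofD hmain

-- ===== VERDICT (by name: the statement is the Claim_ definition above) =====
theorem filterChanges_spec : Claim_equal_filterChanges := by
  intro patterns _ hpre
  unfold Spec_filterChanges
  exact mainEq patterns hpre
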